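-- pv_equiv track=rewrite | github.com/NahimMora/Universidad | Programacion_Numerica/raicesPolinomios.py | transformar_para_cotas_negativas
-- ===== SOURCE A (Python) =====
-- def transformar_para_cotas_negativas(P):
--
--     n = len(P)
--     P1 = []
--
--     for i in range(n):
--         if i % 2 != 0:
--             P1.append(-P[i])
--         else:
--             P1.append(P[i])
--
--     return P1
-- ===== SOURCE B (Python) =====
-- def transformar_para_cotas_negativas(P):
--     P1 = []
--     i = 0
--     while i + 1 < len(P):
--         P1 += [P[i], -P[i + 1]]
--         i += 2
--     if i < len(P):
--         P1.append(P[i])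
--     return P1
-- ===== Notes on version B (the rewrite author's own statement) =====
-- stated objective: alternative
-- what changed: Replaced the per-index loop with an i%2 parity branch by a two-at-a-time while loop that appends each pair [P[i], -P[i+1]] and handles a trailing element separately, so no parity test is performed.
import Mathlib
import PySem

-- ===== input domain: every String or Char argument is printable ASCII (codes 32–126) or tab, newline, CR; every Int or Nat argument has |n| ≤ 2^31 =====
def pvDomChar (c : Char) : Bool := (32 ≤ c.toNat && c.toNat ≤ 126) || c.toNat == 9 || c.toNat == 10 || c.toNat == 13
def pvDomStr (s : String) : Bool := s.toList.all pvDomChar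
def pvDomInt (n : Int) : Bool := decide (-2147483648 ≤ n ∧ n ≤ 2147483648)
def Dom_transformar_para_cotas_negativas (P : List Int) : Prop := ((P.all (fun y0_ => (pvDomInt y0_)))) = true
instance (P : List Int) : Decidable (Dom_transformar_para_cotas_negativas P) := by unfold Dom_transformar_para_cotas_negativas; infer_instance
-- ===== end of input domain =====

-- B replaces A's per-index parity branch by a two-at-a-time pair loop (alternative decomposition, same O(n)).

-- ===== PORT A =====
-- for i in range(n): if i % 2 != 0: P1.append(-P[i]) else: P1.append(P[i])
def transformar_para_cotas_negativas (P : List Int) : List Int :=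
  let n : Int := P.length
  (PySem.List.pyRange 0 n 1).foldl
    (fun P1 i =>
      if i % 2 ≠ 0 then P1 ++ [-(PySem.List.pyGetD P i 0)]
      else P1 ++ [PySem.List.pyGetD P i 0]) []

-- ===== PORT B =====
-- the while loop of Source B; i is the loop counter, P[i]/P[i+1] are always nonnegative in-range
-- indices here, so List.getD is exact for Python's P[i]
def pvAltLoop (P P1 : List Int) (i : Nat) : List Int :=
  if i + 1 < P.length then
    pvAltLoop P (P1 ++ [P.getD i 0, -(P.getD (i + 1) 0)]) (i + 2)
  else if i < P.length then P1 ++ [P.getD i 0]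
  else P1
termination_by P.length - i

def transformar_para_cotas_negativas_alt (P : List Int) : List Int :=
  pvAltLoop P [] 0

-- ===== PRECONDITION & SPEC =====
def Spec_transformar_para_cotas_negativas (P : List Int) (out : List Int) : Prop := out = transformar_para_cotas_negativas_alt P
instance (P : List Int) (out : List Int) : Decidable (Spec_transformar_para_cotas_negativas P out) := by unfold Spec_transformar_para_cotas_negativas; infer_instance

-- ===== CLAIM (what is proved, stated in full; the proofs are below) =====
def Claim_equal_transformar_para_cotas_negativas : Prop := ∀ (P : List Int), Dom_transformar_para_cotas_negativas P → Spec_transformar_para_cotas_negativas P (transformar_para_cotas_negativas P)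

-- ===== LEMMAS AND PROOFS =====

-- proof-only characterisation: keep/negate alternately, two elements at a time
def pvPairs : List Int → List Int
  | [] => []
  | [a] => [a]
  | a :: b :: t => a :: -b :: pvPairs t

theorem pvAltLoop_eq_pairs (P : List Int) (i : Nat) (P1 : List Int) :
    pvAltLoop P P1 i = P1 ++ pvPairs (P.drop i) := by
  induction P1, i using pvAltLoop.induct P with
  | case1 P1 i h ih =>
    rw [pvAltLoop, if_pos h, ih]
    have h1 : i < P.length := by omega
    have h2 : i + 1 < P.length := h
    rw [← List.getElem_cons_drop h1, ← List.getElem_cons_drop h2]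
    simp [pvPairs, List.getElem?_eq_getElem h1, List.getElem?_eq_getElem h2]
  | case2 P1 i h h2 =>
    rw [pvAltLoop, if_neg h, if_pos h2]
    have hd : P.drop i = [P[i]] := by
      rw [← List.getElem_cons_drop h2, List.drop_eq_nil_of_le (by omega)]
    simp [hd, pvPairs, List.getElem?_eq_getElem h2]
  | case3 P1 i h h2 =>
    rw [pvAltLoop, if_neg h, if_neg h2]
    rw [List.drop_eq_nil_of_le (by omega)]
    simp [pvPairs]

theorem a_eq_map (P : List Int) :
    transformar_para_cotas_negativas P =
      (List.range P.length).map
        (fun (k : Nat) => if (k : Int) % 2 ≠ 0 then -(P.getD k 0) else P.getD k 0) := by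
  unfold transformar_para_cotas_negativas
  have hstep :
      (fun (P1 : List Int) (i : Int) =>
        if i % 2 ≠ 0 then P1 ++ [-(PySem.List.pyGetD P i 0)]
        else P1 ++ [PySem.List.pyGetD P i 0]) =
      (fun (P1 : List Int) (i : Int) =>
        P1 ++ [if i % 2 ≠ 0 then -(PySem.List.pyGetD P i 0) else PySem.List.pyGetD P i 0]) := by
    funext P1 i; split <;> rfl
  rw [hstep, PySem.List.foldl_append_singleton_eq_map, PySem.List.pyRange_one]
  simp [List.map_map, Function.comp, PySem.List.pyGetD_natCast]

theorem map_eq_pairs (P : List Int) :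
    (List.range P.length).map
        (fun (k : Nat) => if (k : Int) % 2 ≠ 0 then -(P.getD k 0) else P.getD k 0) = pvPairs P := by
  induction P using pvPairs.induct with
  | case1 => simp [pvPairs]
  | case2 a => simp [pvPairs]
  | case3 a b t ih =>
    have hlen : (a :: b :: t).length = 2 + t.length := by simp; omega
    rw [hlen, List.range_add, List.map_append, List.map_map]
    have hinner : ∀ k : Nat,
        (if ((2 + k : Nat) : Int) % 2 ≠ 0 then -((a :: b :: t).getD (2 + k) 0)
         else (a :: b :: t).getD (2 + k) 0)
        = (if (k : Int) % 2 ≠ 0 then -(t.getD k 0) else t.getD k 0) := by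
      intro k
      have hp : ((2 + k : Nat) : Int) % 2 = (k : Int) % 2 := by push_cast; omega
      have hg : (a :: b :: t).getD (2 + k) 0 = t.getD k 0 := by
        have : 2 + k = k + 2 := by omega
        simp [this]
      rw [hp, hg]
    simp only [Function.comp_def]
    rw [List.map_congr_left (fun k (_ : k ∈ List.range t.length) => hinner k), ih]
    norm_num [pvPairs, List.range_succ]

-- ===== VERDICT (by name: the statement is the Claim_ definition above) =====
theorem transformar_para_cotas_negativas_spec : Claim_equal_transformar_para_cotas_negativas := by
  intro P _
  unfold Spec_transformar_para_cotas_negativas transformar_para_cotas_negativas_alt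
  rw [pvAltLoop_eq_pairs, a_eq_map, List.drop_zero, List.nil_append, map_eq_pairs]
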